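-- pv_equiv track=rewrite | github.com/BramvdnHeuvel/AdventOfCode2020 | 17/ex1/main.py | determine_format
-- ===== SOURCE A (Python) =====
-- from typing import List, Tuple, Dict
--
-- def determine_format(cubes : List[Tuple[int, int, int]]) -> Dict[str, int]:
--     return {
--         'min_x' :   min([c[0] for c in cubes]),
--         'max_x' :   max([c[0] for c in cubes]),
--         'min_y' :   min([c[1] for c in cubes]),
--         'max_y' :   max([c[1] for c in cubes]),
--         'min_z' :   min([c[2] for c in cubes]),
--         'max_z' :   max([c[2] for c in cubes])
--     }
-- ===== SOURCE B (Python) =====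
-- def determine_format(cubes):
--     it = iter(cubes)
--     try:
--         x, y, z = next(it)
--     except StopIteration:
--         raise ValueError("min() arg is an empty sequence")
--     min_x = max_x = x
--     min_y = max_y = y
--     min_z = max_z = z
--     for x, y, z in it:
--         if x < min_x: min_x = x
--         if x > max_x: max_x = x
--         if y < min_y: min_y = y
--         if y > max_y: max_y = y
--         if z < min_z: min_z = z
--         if z > max_z: max_z = z
--     return {'min_x': min_x, 'max_x': max_x, 'min_y': min_y,
--             'max_y': max_y, 'min_z': min_z, 'max_z': max_z}
-- ===== Notes on version B (the rewrite author's own statement) =====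
-- stated objective: alternative
-- what changed: Six separate comprehension+min/max passes replaced by a single loop over the cubes maintaining six accumulators seeded from the first cube; both raise ValueError on the empty list, excluded by Pre_.
import Mathlib
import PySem

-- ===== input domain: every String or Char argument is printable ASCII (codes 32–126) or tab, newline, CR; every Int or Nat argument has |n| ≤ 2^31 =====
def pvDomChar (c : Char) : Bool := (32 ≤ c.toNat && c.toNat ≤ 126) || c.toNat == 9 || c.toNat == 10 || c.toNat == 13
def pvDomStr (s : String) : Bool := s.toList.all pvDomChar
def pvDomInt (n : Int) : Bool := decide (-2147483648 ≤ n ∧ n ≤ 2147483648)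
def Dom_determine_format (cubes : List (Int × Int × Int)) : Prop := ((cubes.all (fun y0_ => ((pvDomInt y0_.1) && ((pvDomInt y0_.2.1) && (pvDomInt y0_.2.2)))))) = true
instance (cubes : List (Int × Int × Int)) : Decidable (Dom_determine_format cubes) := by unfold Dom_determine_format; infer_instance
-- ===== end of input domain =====

-- ===== PORT A =====
-- B changes: one loop with six accumulators instead of six min/max passes over temporary lists.
-- Python's min([])/max([]) raise ValueError on empty input; Pre_ excludes the empty list.
def determine_format (cubes : List (Int × Int × Int)) : List (String × Int) :=
  [("min_x", (PySem.List.min? (cubes.map (fun c => c.1)) (fun v => v)).getD 0),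
   ("max_x", (PySem.List.max? (cubes.map (fun c => c.1)) (fun v => v)).getD 0),
   ("min_y", (PySem.List.min? (cubes.map (fun c => c.2.1)) (fun v => v)).getD 0),
   ("max_y", (PySem.List.max? (cubes.map (fun c => c.2.1)) (fun v => v)).getD 0),
   ("min_z", (PySem.List.min? (cubes.map (fun c => c.2.2)) (fun v => v)).getD 0),
   ("max_z", (PySem.List.max? (cubes.map (fun c => c.2.2)) (fun v => v)).getD 0)]

-- ===== PORT B =====
def determine_format_alt (cubes : List (Int × Int × Int)) : List (String × Int) :=
  match cubes with
  | [] => []   -- Python B raises ValueError here; excluded by Pre_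
  | c :: rest =>
    let s := rest.foldl
      (fun (a : Int × Int × Int × Int × Int × Int) c =>
        (min a.1 c.1, max a.2.1 c.1,
         min a.2.2.1 c.2.1, max a.2.2.2.1 c.2.1,
         min a.2.2.2.2.1 c.2.2, max a.2.2.2.2.2 c.2.2))
      (c.1, c.1, c.2.1, c.2.1, c.2.2, c.2.2)
    [("min_x", s.1), ("max_x", s.2.1), ("min_y", s.2.2.1),
     ("max_y", s.2.2.2.1), ("min_z", s.2.2.2.2.1), ("max_z", s.2.2.2.2.2)]

-- ===== PRECONDITION & SPEC =====
-- Pre_ excludes only the empty list, on which both Pythons raise ValueError.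
def Pre_determine_format (cubes : List (Int × Int × Int)) : Prop := cubes ≠ []
instance (cubes : List (Int × Int × Int)) : Decidable (Pre_determine_format cubes) := by
  unfold Pre_determine_format; infer_instance
def pvWitness_determine_format : (List (Int × Int × Int)) := [(1, 2, 3), (-4, 0, 7)]
def Spec_determine_format (cubes : List (Int × Int × Int)) (out : List (String × Int)) : Prop := out = determine_format_alt cubes
instance (cubes : List (Int × Int × Int)) (out : List (String × Int)) : Decidable (Spec_determine_format cubes out) := by unfold Spec_determine_format; infer_instance

-- ===== CLAIM (what is proved, stated in full; the proofs are below) =====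
def Claim_equal_determine_format : Prop := ∀ (cubes : List (Int × Int × Int)), Dom_determine_format cubes → Pre_determine_format cubes → Spec_determine_format cubes (determine_format cubes)

-- ===== LEMMAS AND PROOFS =====
theorem fold6_eq (rest : List (Int × Int × Int))
    (a : Int × Int × Int × Int × Int × Int) :
    rest.foldl
      (fun (a : Int × Int × Int × Int × Int × Int) c =>
        (min a.1 c.1, max a.2.1 c.1,
         min a.2.2.1 c.2.1, max a.2.2.2.1 c.2.1,
         min a.2.2.2.2.1 c.2.2, max a.2.2.2.2.2 c.2.2)) a =
    ((rest.map (fun c => c.1)).foldl min a.1,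
     (rest.map (fun c => c.1)).foldl max a.2.1,
     (rest.map (fun c => c.2.1)).foldl min a.2.2.1,
     (rest.map (fun c => c.2.1)).foldl max a.2.2.2.1,
     (rest.map (fun c => c.2.2)).foldl min a.2.2.2.2.1,
     (rest.map (fun c => c.2.2)).foldl max a.2.2.2.2.2) := by
  induction rest generalizing a with
  | nil => rfl
  | cons h t ih => simp [List.foldl, ih]

theorem determine_format_spec : Claim_equal_determine_format := by
  intro cubes _ hpre
  unfold Spec_determine_format determine_format determine_format_alt
  match cubes with
  | [] => exact absurd rfl hpre
  | c :: rest =>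
    simp only [List.map_cons, PySem.List.min?_id_cons, PySem.List.max?_id_cons,
      Option.getD_some, fold6_eq rest (c.1, c.1, c.2.1, c.2.1, c.2.2, c.2.2)]
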